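-- pv_equiv track=rewrite | github.com/dbeyter/sv-merger | measure_SV_distance.py | get_sv_sample
-- ===== SOURCE A (Python) =====
-- SAMPLE_COL = 4
--
-- def get_sv_sample(SVs_to_cluster):
-- 	sv_pns = [SVs_to_cluster[i][SAMPLE_COL] for i in range(len(SVs_to_cluster))]
-- 	pn_numdict = {}
-- 	ind = 0
--
-- 	sv_pn_nums = []
-- 	for i in range(len(sv_pns)):
-- 		pn = sv_pns[i]
-- 		if pn not in pn_numdict:
-- 			pn_numdict[pn] = ind
-- 			ind += 1
-- 		sv_pn_nums.append(pn_numdict[pn])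
--
--
-- 	return(sv_pn_nums, pn_numdict)
-- ===== SOURCE B (Python) =====
-- SAMPLE_COL = 4
--
-- def get_sv_sample(SVs_to_cluster):
--     sv_pns = [row[SAMPLE_COL] for row in SVs_to_cluster]
--     # a name's code is the number of distinct names strictly before its first occurrence
--     sv_pn_nums = [len(set(sv_pns[:sv_pns.index(pn)])) for pn in sv_pns]
--     pn_numdict = {pn: num for pn, num in zip(sv_pns, sv_pn_nums)}
--     return (sv_pn_nums, pn_numdict)
-- ===== Notes on version B (the rewrite author's own statement) =====
-- stated objective: alternative
-- what changed: Eliminates A's incremental dict/counter loop: B computes each name's code directly as the number of distinct names strictly before its first occurrence (index + prefix-set counting per element) and then rebuilds the dict from the (name, code) pairs.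
import Mathlib
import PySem

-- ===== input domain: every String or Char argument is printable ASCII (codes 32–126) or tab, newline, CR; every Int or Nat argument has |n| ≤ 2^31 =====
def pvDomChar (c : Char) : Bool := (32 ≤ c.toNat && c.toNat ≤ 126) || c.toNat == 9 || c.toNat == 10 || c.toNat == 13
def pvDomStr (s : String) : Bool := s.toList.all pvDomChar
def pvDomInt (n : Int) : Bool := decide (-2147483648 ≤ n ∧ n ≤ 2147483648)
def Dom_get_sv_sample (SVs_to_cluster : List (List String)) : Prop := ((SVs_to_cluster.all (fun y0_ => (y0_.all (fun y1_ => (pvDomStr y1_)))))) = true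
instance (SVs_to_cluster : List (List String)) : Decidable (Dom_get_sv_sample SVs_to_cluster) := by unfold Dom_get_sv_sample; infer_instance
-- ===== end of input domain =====

-- B drops A's incremental dict/counter loop entirely: each name's code is computed directly as the
-- number of distinct names strictly before its first occurrence (prefix-set counting), and the dict
-- is rebuilt from the (name, code) pairs; different algorithm, A is O(n), B is O(n^2)
-- (objective: alternative, not faster).

-- ===== PORT A =====
def get_sv_sample (SVs_to_cluster : List (List String)) : List Int × (List (String × Int)) :=
  -- sv_pns = [SVs_to_cluster[i][SAMPLE_COL] for i in range(len(SVs_to_cluster))]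
  let sv_pns := (PySem.List.pyRange 0 (PySem.List.len SVs_to_cluster)).map
      (fun i => PySem.List.pyGetD (PySem.List.pyGetD SVs_to_cluster i []) 4 "")
  -- pn_numdict = {}; ind = 0; sv_pn_nums = []; for i in range(len(sv_pns)): …
  let st := (PySem.List.pyRange 0 (PySem.List.len sv_pns)).foldl
      (fun (st : PySem.Dict String Int × Int × List Int) i =>
        let pn := PySem.List.pyGetD sv_pns i ""
        let di : PySem.Dict String Int × Int :=
          if st.1.contains pn = false then (st.1.insert pn st.2.1, st.2.1 + 1) else (st.1, st.2.1)
        (di.1, di.2, st.2.2 ++ [di.1.getD pn 0]))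
      (PySem.Dict.empty, 0, [])
  (st.2.2, st.1.items)

-- ===== PORT B =====
-- len(set(sv_pns[:sv_pns.index(pn)])); the 'none' branch is unreachable (pn is drawn from sv_pns)
def altCode (sv_pns : List String) (pn : String) : Int :=
  match PySem.List.index? sv_pns pn with
  | some k => ((PySem.Set.ofList (PySem.List.slice sv_pns none (some (k : Int)))).length : Int)
  | none => 0

def get_sv_sample_alt (SVs_to_cluster : List (List String)) : List Int × (List (String × Int)) :=
  -- sv_pns = [row[SAMPLE_COL] for row in SVs_to_cluster]
  let sv_pns := SVs_to_cluster.map (fun row => PySem.List.pyGetD row 4 "")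
  -- sv_pn_nums = [len(set(sv_pns[:sv_pns.index(pn)])) for pn in sv_pns]
  let sv_pn_nums := sv_pns.map (fun pn => altCode sv_pns pn)
  -- pn_numdict = {pn: num for pn, num in zip(sv_pns, sv_pn_nums)}
  let pn_numdict := (sv_pns.zip sv_pn_nums).foldl
      (fun (d : PySem.Dict String Int) p => d.insert p.1 p.2) PySem.Dict.empty
  (sv_pn_nums, pn_numdict.items)

-- ===== PRECONDITION & SPEC =====
-- Pre_ excludes exactly the inputs where Python A raises IndexError: a row shorter than 5 columns.
def Pre_get_sv_sample (SVs_to_cluster : List (List String)) : Prop :=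
  ∀ row ∈ SVs_to_cluster, 5 ≤ row.length
instance (SVs_to_cluster : List (List String)) : Decidable (Pre_get_sv_sample SVs_to_cluster) := by unfold Pre_get_sv_sample; infer_instance
def pvWitness_get_sv_sample : List (List String) := [["a", "b", "c", "d", "x"], ["a", "b", "c", "d", "y"]]

def Spec_get_sv_sample (SVs_to_cluster : List (List String)) (out : List Int × (List (String × Int))) : Prop := out = get_sv_sample_alt SVs_to_cluster
instance (SVs_to_cluster : List (List String)) (out : List Int × (List (String × Int))) : Decidable (Spec_get_sv_sample SVs_to_cluster out) := by unfold Spec_get_sv_sample; infer_instance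

-- ===== CLAIM (what is proved, stated in full; the proofs are below) =====
def Claim_equal_get_sv_sample : Prop := ∀ (SVs_to_cluster : List (List String)), Dom_get_sv_sample SVs_to_cluster → Pre_get_sv_sample SVs_to_cluster → Spec_get_sv_sample SVs_to_cluster (get_sv_sample SVs_to_cluster)

-- ===== LEMMAS AND PROOFS =====

-- A's loop body, as a step on (dict, counter, output) fed one name
def pvStep (st : PySem.Dict String Int × Int × List Int) (pn : String) :
    PySem.Dict String Int × Int × List Int :=
  let di : PySem.Dict String Int × Int :=
    if st.1.contains pn = false then (st.1.insert pn st.2.1, st.2.1 + 1) else (st.1, st.2.1)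
  (di.1, di.2, st.2.2 ++ [di.1.getD pn 0])

-- the dict A's loop builds over a name list: first-occurrence order, value = index in dedup
def pvDict (l : List String) : PySem.Dict String Int :=
  (PySem.List.enumerate (PySem.List.dedup l)).foldl
    (fun (d : PySem.Dict String Int) p => d.insert p.2 p.1) PySem.Dict.empty

lemma pvDict_keys (l : List String) : (pvDict l).keys = PySem.List.dedup l := by
  refine Eq.trans (PySem.Dict.keys_foldl_insert_key (PySem.List.enumerate (PySem.List.dedup l))
    (fun p => p.2) (fun _ p => p.1) PySem.Dict.empty) ?_
  simp [PySem.List.map_snd_enumerate, PySem.Set.update_nil_left, PySem.Dict.keys_empty]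

lemma pvDict_append_mem (xs : List String) (x : String) (hx : x ∈ xs) :
    pvDict (xs ++ [x]) = pvDict xs := by
  unfold pvDict
  rw [PySem.List.dedup_eq_ofList, PySem.Set.ofList_append_singleton,
      PySem.Set.add_of_mem (by rw [PySem.Set.mem_ofList]; exact hx),
      ← PySem.List.dedup_eq_ofList]

lemma pvDict_append_not_mem (xs : List String) (x : String) (hx : x ∉ xs) :
    pvDict (xs ++ [x]) = (pvDict xs).insert x ((PySem.List.dedup xs).length : Int) := by
  unfold pvDict
  rw [PySem.List.dedup_eq_ofList, PySem.Set.ofList_append_singleton,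
      PySem.Set.add_of_not_mem (by rw [PySem.Set.mem_ofList]; exact hx),
      ← PySem.List.dedup_eq_ofList, PySem.List.enumerate_append, List.foldl_append]
  simp [PySem.List.enumerate_cons, PySem.List.enumerate_nil]

lemma pvDict_contains (l : List String) (x : String) :
    (pvDict l).contains x = decide (x ∈ l) := by
  rw [PySem.Dict.contains_eq_decide_mem_keys, pvDict_keys]
  simp

-- loop invariant: A's fold over the name list produces pvDict, its size, and the mapped lookups
lemma pvLoop_eq (l : List String) :
    l.foldl pvStep (PySem.Dict.empty, 0, []) =
      (pvDict l, ((PySem.List.dedup l).length : Int),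
        l.map (fun pn => (pvDict l).getD pn 0)) := by
  induction l using List.reverseRecOn with
  | nil => rfl
  | append_singleton xs x ih =>
    rw [List.foldl_append, ih]
    by_cases hx : x ∈ xs
    · have hc : (pvDict xs).contains x = true := by simp [pvDict_contains, hx]
      have hdd : PySem.Set.ofList (xs ++ [x]) = PySem.Set.ofList xs := by
        rw [PySem.Set.ofList_append_singleton,
            PySem.Set.add_of_mem (by rw [PySem.Set.mem_ofList]; exact hx)]
      simp [pvStep, hc, pvDict_append_mem xs x hx, hdd]
    · have hc : (pvDict xs).contains x = false := by simp [pvDict_contains, hx]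
      have hd := pvDict_append_not_mem xs x hx
      have hdd : PySem.Set.ofList (xs ++ [x]) = PySem.Set.ofList xs ++ [x] := by
        rw [PySem.Set.ofList_append_singleton,
            PySem.Set.add_of_not_mem (by rw [PySem.Set.mem_ofList]; exact hx)]
      have hmap : xs.map
          (fun pn => ((pvDict xs).insert x ((PySem.List.dedup xs).length : Int)).getD pn 0)
            = xs.map (fun pn => (pvDict xs).getD pn 0) := by
        refine List.map_congr_left (fun pn hpn => ?_)
        have hne : pn ≠ x := fun h => hx (h ▸ hpn)
        rw [PySem.Dict.getD_insert, if_neg hne]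
      refine Prod.ext ?_ (Prod.ext ?_ ?_)
      · simp [pvStep, hc, hd]
      · simp only [List.foldl_cons, List.foldl_nil, pvStep, hc]
        simp only [PySem.List.dedup_eq_ofList, hdd, List.length_append, List.length_singleton]
        push_cast; ring
      · simp only [List.foldl_cons, List.foldl_nil, pvStep, hc]
        rw [List.map_append, hd, hmap]
        simp [PySem.Dict.getD_insert_self]

lemma pvBody_eq (sv_pns : List String) :
    (fun (st : PySem.Dict String Int × Int × List Int) (i : Int) =>
        let pn := PySem.List.pyGetD sv_pns i ""
        let di : PySem.Dict String Int × Int :=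
          if st.1.contains pn = false then (st.1.insert pn st.2.1, st.2.1 + 1) else (st.1, st.2.1)
        (di.1, di.2, st.2.2 ++ [di.1.getD pn 0]))
      = (fun st i => pvStep st (PySem.List.pyGetD sv_pns i "")) := rfl

-- altCode only looks at the prefix up to (and excluding) the first occurrence
lemma altCode_append (xs ys : List String) (pn : String) (h : pn ∈ xs) :
    altCode (xs ++ ys) pn = altCode xs pn := by
  obtain ⟨k, hk⟩ := (PySem.List.index?_isSome_iff xs pn).mpr h |> Option.isSome_iff_exists.mp
  obtain ⟨hlt, -, -⟩ := PySem.List.getElem_of_index?_eq_some hk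
  unfold altCode
  rw [PySem.List.index?_append_of_mem ys h, hk]
  simp only [PySem.List.slice_to_natCast, List.take_append_of_le_length (le_of_lt hlt)]

lemma pvDict_getD (l : List String) (pn : String) (h : pn ∈ l) :
    (pvDict l).getD pn 0 = altCode l pn := by
  induction l using List.reverseRecOn with
  | nil => cases h
  | append_singleton xs x ih =>
    by_cases hpn : pn ∈ xs
    · rw [altCode_append xs [x] pn hpn, ← ih hpn]
      by_cases hx : x ∈ xs
      · rw [pvDict_append_mem xs x hx]
      · rw [pvDict_append_not_mem xs x hx, PySem.Dict.getD_insert,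
            if_neg (show pn ≠ x from fun he => hx (he ▸ hpn))]
    · have hex : pn = x := by
        rcases List.mem_append.mp h with h' | h'
        · exact absurd h' hpn
        · simpa using h'
      subst hex
      rw [pvDict_append_not_mem xs pn hpn, PySem.Dict.getD_insert_self]
      unfold altCode
      rw [PySem.List.index?_append_singleton_self xs pn hpn]
      simp only [PySem.List.slice_to_natCast, List.take_left, PySem.List.dedup_eq_ofList]

-- inserting the value already stored at an existing key is a no-op
lemma pvInsert_self_noop (d : PySem.Dict String Int) (k : String)
    (hc : d.contains k = true) (hnd : d.keys.Nodup) :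
    d.insert k (d.getD k 0) = d := by
  apply PySem.Dict.ext
  rw [PySem.Dict.items_insert_of_contains d (d.getD k 0) hc]
  have hid : ∀ p ∈ d.items, (if (p.1 == k) = true then (k, d.getD k 0) else p) = p := by
    intro p hp
    by_cases he : p.1 = k
    · have hmem : (k, p.2) ∈ d.items := by rw [← he, Prod.mk.eta]; exact hp
      have hv : d.getD k 0 = p.2 := PySem.Dict.getD_of_mem_items d hmem hnd 0
      rw [if_pos (by simpa using he), hv, ← he, Prod.mk.eta]
    · simp [he]
  rw [List.map_congr_left hid, List.map_id']

-- B's dict-comprehension fold rebuilds exactly A's dict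
lemma pvZipFold (l : List String) :
    ∀ ys xs, l = xs ++ ys →
      ys.foldl (fun (d : PySem.Dict String Int) pn => d.insert pn (altCode l pn)) (pvDict xs)
        = pvDict l := by
  intro ys
  induction ys with
  | nil => intro xs hl; rw [hl, List.append_nil]; rfl
  | cons y t ih =>
    intro xs hl
    have hl' : l = (xs ++ [y]) ++ t := by simp [hl]
    have hstep : (pvDict xs).insert y (altCode l y) = pvDict (xs ++ [y]) := by
      by_cases hy : y ∈ xs
      · rw [hl', altCode_append _ _ _ (List.mem_append_left _ hy),
            altCode_append _ _ _ hy, ← pvDict_getD xs y hy]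
        rw [pvDict_append_mem xs y hy]
        exact pvInsert_self_noop _ _ (by simp [pvDict_contains, hy])
          (pvDict_keys xs ▸ PySem.List.nodup_dedup xs)
      · have hcode : altCode l y = ((PySem.List.dedup xs).length : Int) := by
          rw [hl', altCode_append _ _ _ (by simp)]
          unfold altCode
          rw [PySem.List.index?_append_singleton_self xs y hy]
          simp only [PySem.List.slice_to_natCast, List.take_left, PySem.List.dedup_eq_ofList]
        rw [hcode, pvDict_append_not_mem xs y hy]
    rw [List.foldl_cons, hstep]
    exact ih (xs ++ [y]) hl'

-- ===== VERDICT (by name: the statement is the Claim_ definition above) =====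
theorem get_sv_sample_spec : Claim_equal_get_sv_sample := by
  intro svs _ _
  have h1 : ∀ i : Int,
      PySem.List.pyGetD (PySem.List.pyGetD svs i []) 4 ""
        = PySem.List.pyGetD (svs.map (fun row => PySem.List.pyGetD row 4 "")) i "" :=
    fun i => (PySem.List.pyGetD_map (fun row => PySem.List.pyGetD row 4 "") svs i []).symm
  have hpns : (PySem.List.pyRange 0 (PySem.List.len svs)).map
      (fun i => PySem.List.pyGetD (PySem.List.pyGetD svs i []) 4 "")
        = svs.map (fun row => PySem.List.pyGetD row 4 "") := by
    have hlen : PySem.List.len svs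
        = PySem.List.len (svs.map (fun row => PySem.List.pyGetD row 4 "")) := by
      simp [PySem.List.len]
    rw [hlen, List.map_congr_left (fun i _ => h1 i),
        PySem.List.map_pyGetD_pyRange_zero]
  set l := svs.map (fun row => PySem.List.pyGetD row 4 "") with hl
  have hfold := PySem.List.foldl_pyRange_pyGetD l "" pvStep
      (PySem.Dict.empty, (0 : Int), ([] : List Int)) (a := 0) le_rfl
  simp only [Int.toNat_zero, List.drop_zero] at hfold
  have hzip : l.zip (l.map (fun pn => altCode l pn))
      = l.map (fun pn => (pn, altCode l pn)) := by
    simpa using (List.zip_map' (f := @id String) (g := fun pn => altCode l pn) (l := l))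
  have hdict : (l.zip (l.map (fun pn => altCode l pn))).foldl
      (fun (d : PySem.Dict String Int) p => d.insert p.1 p.2) PySem.Dict.empty = pvDict l := by
    rw [hzip, List.foldl_map]
    exact pvZipFold l l [] rfl
  have hmap : l.map (fun pn => (pvDict l).getD pn 0) = l.map (fun pn => altCode l pn) :=
    List.map_congr_left (fun pn hpn => pvDict_getD l pn hpn)
  simp only [Spec_get_sv_sample, get_sv_sample, get_sv_sample_alt, hpns, pvBody_eq, ← hl]
  rw [hfold, pvLoop_eq, hdict, hmap]
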